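-- pv_equiv track=rewrite | github.com/the-shivers/advent_of_code | 2024/day15/solution.py | l_move
-- ===== SOURCE A (Python) =====
-- def l_move(pos, dir, map):
--     assert dir[1] == 0 # We should only use this for lateral moves.
--     px, py = pos
--     dx, dy = dir
--     next = map[py+dy][px+dx]
--     if next == '#':
--         return False
--     elif next == '.' or l_move((px+dx, py+dy), dir, map):
--         map[py][px], map[py+dy][px+dx] = map[py+dy][px+dx], map[py][px]
--         return True
-- ===== SOURCE B (Python) =====
-- def l_move(pos, dir, map):
--     # Iterative scan-then-shift instead of A's recursion-with-swaps; returns False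
--     # (not None) when the pushed box line is blocked by a wall.  Mutates `map` in
--     # place exactly like A on a successful move.
--     assert dir[1] == 0  # lateral moves only
--     px, py = pos
--     dx = dir[0]
--     row = map[py]
--     i = px + dx
--     while row[i] != '#' and row[i] != '.':
--         i += dx
--     if row[i] == '#':
--         return False
--     while i != px:
--         row[i] = row[i - dx]
--         i -= dx
--     row[px] = '.'
--     return True
-- ===== Notes on version B (the rewrite author's own statement) =====
-- stated objective: alternative
-- what changed: A's recursion that bubbles the gap back with pairwise swaps is replaced by an iterative forward scan to the first wall/empty cell followed by a single backward block shift; where a pushed box line hits a wall A falls off the end of the function and returns None, B returns False.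
-- intended difference: On lateral pushes where one or more boxes are followed by a wall, A returns None (it falls off the end of the function) while B returns False, the intended 'move failed' answer for a boolean move predicate. — e.g. on l_move((0, 0), (1, 0), [["@", "O", "#"]]): A returns none, B returns some false
import Mathlib
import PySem

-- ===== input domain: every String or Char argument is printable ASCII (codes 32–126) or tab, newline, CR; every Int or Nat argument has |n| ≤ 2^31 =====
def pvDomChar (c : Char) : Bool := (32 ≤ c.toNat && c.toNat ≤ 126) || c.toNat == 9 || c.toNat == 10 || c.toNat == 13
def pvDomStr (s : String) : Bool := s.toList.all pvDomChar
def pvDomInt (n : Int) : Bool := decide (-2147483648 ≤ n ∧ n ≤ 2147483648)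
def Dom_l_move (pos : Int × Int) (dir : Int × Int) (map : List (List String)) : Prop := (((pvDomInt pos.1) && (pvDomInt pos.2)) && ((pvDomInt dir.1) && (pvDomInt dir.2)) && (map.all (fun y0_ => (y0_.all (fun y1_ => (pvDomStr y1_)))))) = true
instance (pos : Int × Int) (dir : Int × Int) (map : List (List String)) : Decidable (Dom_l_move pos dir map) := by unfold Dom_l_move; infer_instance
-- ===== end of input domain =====

-- B replaces A's recursion-with-swaps by an iterative forward scan plus one backward block shift,
-- and returns False (instead of A's None) when the pushed box line is blocked by a wall (see D_).
-- Both Pythons mutate `map` in place (identically on a successful move); the equivalence proved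
-- here is about the RETURN value only.

-- ===== PORT A =====
-- helpers for A's wrapper: the row at pos (map[py]; [] only when that lookup raises, in which case the
-- recursion stops at its first read anyway), the fuel bound (under Pre_ the scan visits at most
-- 2*len(row) distinct Python indices), and the two-level Python index map[y][x] (none = IndexError).
def pvRow (pos : Int × Int) (map : List (List String)) : List String := (PySem.List.pyGet? map pos.2).getD []
def pvFuel (pos : Int × Int) (map : List (List String)) : Nat := 2 * (pvRow pos map).length + 2
def pvCell (map : List (List String)) (y x : Int) : Option String := (PySem.List.pyGet? map y).bind fun row => PySem.List.pyGet? row x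

-- the recursion of Source A; fuel only makes it total in Lean (under Pre_l_move it is never exhausted);
-- `none` stands for Python's `None` return as well as for a propagated exception (outside Pre_).
def l_move_rec (fuel : Nat) (pos : Int × Int) (dir : Int × Int) (map : List (List String)) : Option Bool :=
  match fuel with
  | 0 => none                                           -- fuel exhausted: unreachable under Pre_
  | fuel + 1 =>
    match pvCell map (pos.2 + dir.2) (pos.1 + dir.1) with   -- next = map[py+dy][px+dx]
    | none => none                                      -- IndexError
    | some next =>
      if next = "#" then some false
      else if next = "." then some true                 -- (the swap mutates map only)
      else
        match l_move_rec fuel (pos.1 + dir.1, pos.2 + dir.2) dir map with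
        | some true => some true                        -- (the swap mutates map only)
        | _ => none                                     -- implicit `return None`, or propagated error

def l_move (pos : Int × Int) (dir : Int × Int) (map : List (List String)) : Option Bool :=
  if dir.2 ≠ 0 then none                                -- AssertionError (outside Pre_)
  else l_move_rec (pvFuel pos map) pos dir map

-- ===== PORT B =====
-- the scan loop of Source B (same fuel guard); the subsequent shift loop and `row[px] = '.'` only
-- mutate `row`, so the returned value is exactly the scan outcome.
def l_scan (fuel : Nat) (row : List String) (i : Int) (dx : Int) : Option Bool :=
  match fuel with
  | 0 => none
  | fuel + 1 =>
    match PySem.List.pyGet? row i with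
    | none => none                                      -- IndexError on row[i]
    | some c =>
      if c = "#" then some false
      else if c = "." then some true
      else l_scan fuel row (i + dx) dx

def l_move_alt (pos : Int × Int) (dir : Int × Int) (map : List (List String)) : Option Bool :=
  if dir.2 ≠ 0 then none                                -- AssertionError (outside Pre_)
  else
    let px := pos.1
    let py := pos.2
    let dx := dir.1
    match PySem.List.pyGet? map py with                 -- row = map[py]
    | none => none                                      -- IndexError
    | some row => l_scan (2 * row.length + 2) row (px + dx) dx

-- ===== PRECONDITION & SPEC =====
-- a cell holding a box: present, and neither wall nor empty
abbrev isBoxCell (c : Option String) : Prop := c.isSome = true ∧ c ≠ some "#" ∧ c ≠ some "."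

-- Pre_ = exactly the inputs where Source A returns: the move is lateral (else AssertionError), and the
-- scan from pos meets a wall or an empty cell while every index it reads (Python semantics, negative
-- = from the end) stays in range (else IndexError / unbounded recursion); when it meets an empty
-- cell, pos itself must also be a readable index (the swaps read map[py][px]).
def Pre_l_move (pos : Int × Int) (dir : Int × Int) (map : List (List String)) : Prop :=
  dir.2 = 0 ∧
  (∃ k < 2 * ((PySem.List.pyGet? map pos.2).getD []).length + 2, 1 ≤ k ∧
    (∀ j < k, 1 ≤ j → isBoxCell (PySem.List.pyGet? ((PySem.List.pyGet? map pos.2).getD [])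
        (pos.1 + dir.1 * (j : Int)))) ∧
    (PySem.List.pyGet? ((PySem.List.pyGet? map pos.2).getD []) (pos.1 + dir.1 * (k : Int)) = some "#" ∨
     (PySem.List.pyGet? ((PySem.List.pyGet? map pos.2).getD []) (pos.1 + dir.1 * (k : Int)) = some "." ∧
      -(((PySem.List.pyGet? map pos.2).getD []).length : Int) ≤ pos.1 ∧
      pos.1 < (((PySem.List.pyGet? map pos.2).getD []).length : Int))))
instance (pos : Int × Int) (dir : Int × Int) (map : List (List String)) : Decidable (Pre_l_move pos dir map) := by unfold Pre_l_move; infer_instance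

def pvWitness_l_move : (Int × Int) × (Int × Int) × List (List String) := ((0, 0), (1, 0), [["@", "."]])

-- On lateral pushes where one or more boxes are followed by a wall, A returns None (it falls off the
-- end of the function) while B returns False, the intended 'move failed' answer.
def D_l_move (pos : Int × Int) (dir : Int × Int) (map : List (List String)) : Prop :=
  ∃ k < pvFuel pos map,
    (∀ j ≤ k, pvCell map pos.2 (pos.1 + dir.1 * (j + 1)) ∉ [some "#", some "."]) ∧
    pvCell map pos.2 (pos.1 + dir.1 * (k + 2)) = some "#"
instance (pos : Int × Int) (dir : Int × Int) (map : List (List String)) : Decidable (D_l_move pos dir map) := by unfold D_l_move; infer_instance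

def Spec_l_move (pos : Int × Int) (dir : Int × Int) (map : List (List String)) (out : Option Bool) : Prop := ¬ D_l_move pos dir map → out = l_move_alt pos dir map
instance (pos : Int × Int) (dir : Int × Int) (map : List (List String)) (out : Option Bool) : Decidable (Spec_l_move pos dir map out) := by unfold Spec_l_move; infer_instance

def pvDiffWitness_l_move : (Int × Int) × (Int × Int) × List (List String) := ((0, 0), (1, 0), [["@", "O", "#"]])
def pvDiffWitnessOut_l_move : (Option Bool) × (Option Bool) := (none, some false)

-- ===== CLAIM (what is proved, stated in full; the proofs are below) =====
def Claim_unchanged_l_move : Prop := ∀ (pos : Int × Int) (dir : Int × Int) (map : List (List String)), Dom_l_move pos dir map → Pre_l_move pos dir map → Spec_l_move pos dir map (l_move pos dir map)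
def Claim_changed_l_move : Prop := Dom_l_move (pvDiffWitness_l_move.1) (pvDiffWitness_l_move.2.1) (pvDiffWitness_l_move.2.2) ∧ Pre_l_move (pvDiffWitness_l_move.1) (pvDiffWitness_l_move.2.1) (pvDiffWitness_l_move.2.2) ∧ D_l_move (pvDiffWitness_l_move.1) (pvDiffWitness_l_move.2.1) (pvDiffWitness_l_move.2.2) ∧ l_move (pvDiffWitness_l_move.1) (pvDiffWitness_l_move.2.1) (pvDiffWitness_l_move.2.2) = pvDiffWitnessOut_l_move.1 ∧ l_move_alt (pvDiffWitness_l_move.1) (pvDiffWitness_l_move.2.1) (pvDiffWitness_l_move.2.2) = pvDiffWitnessOut_l_move.2 ∧ pvDiffWitnessOut_l_move.1 ≠ pvDiffWitnessOut_l_move.2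
def Claim_exact_l_move : Prop := ∀ (pos : Int × Int) (dir : Int × Int) (map : List (List String)), Dom_l_move pos dir map → Pre_l_move pos dir map → D_l_move pos dir map → l_move pos dir map ≠ l_move_alt pos dir map

-- ===== LEMMAS AND PROOFS =====

-- how A's recursion post-processes the scan outcome: True passes through, False stays False only
-- in the very first frame (first scanned cell a wall), otherwise the value degrades to None.
def aFrom (s : Option Bool) (c : Option String) : Option Bool :=
  match s with
  | some true => some true
  | some false => if c = some "#" then some false else none
  | none => none

lemma l_move_rec_eq_scan (map : List (List String)) (row : List String) (py dx : Int)
    (hrow : PySem.List.pyGet? map py = some row) :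
    ∀ (fuel : Nat) (px : Int),
      l_move_rec fuel (px, py) (dx, 0) map
        = aFrom (l_scan fuel row (px + dx) dx) (PySem.List.pyGet? row (px + dx)) := by
  intro fuel
  induction fuel with
  | zero => intro px; simp [l_move_rec, l_scan, aFrom]
  | succ n ih =>
    intro px
    simp only [l_move_rec, l_scan]
    have h0 : py + (0 : Int) = py := by ring
    have hcell : ∀ x : Int, pvCell map py x = PySem.List.pyGet? row x := by
      intro x; simp [pvCell, hrow]
    rw [h0, hcell]
    cases hc : PySem.List.pyGet? row (px + dx) with
    | none => simp [aFrom]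
    | some c =>
      by_cases h1 : c = "#"
      · simp [h1, aFrom]
      · by_cases h2 : c = "."
        · simp [h2, aFrom]
        · simp only [if_neg h1, if_neg h2]
          rw [ih (px + dx)]
          cases hs : l_scan n row (px + dx + dx) dx with
          | none => simp [aFrom]
          | some b => cases b <;> simp [aFrom, h1]

lemma scan_false_exists (row : List String) (dx : Int) :
    ∀ (fuel : Nat) (i : Int), l_scan fuel row i dx = some false →
      ∃ k : Nat, k + 1 ≤ fuel ∧
        (∀ j < k, isBoxCell (PySem.List.pyGet? row (i + dx * (j : Int)))) ∧
        PySem.List.pyGet? row (i + dx * (k : Int)) = some "#" := by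
  intro fuel
  induction fuel with
  | zero => intro i h; simp [l_scan] at h
  | succ n ih =>
    intro i h
    simp only [l_scan] at h
    cases hc : PySem.List.pyGet? row i with
    | none => simp [hc] at h
    | some c =>
      by_cases h1 : c = "#"
      · refine ⟨0, by omega, by intro j hj; omega, by simpa [h1] using hc⟩
      · by_cases h2 : c = "."
        · simp [hc, h2] at h
        · simp only [hc, h1, h2] at h
          simp at h
          obtain ⟨k, hk, hbox, hwall⟩ := ih (i + dx) h
          refine ⟨k + 1, by omega, ?_, ?_⟩
          · intro j hj
            cases j with
            | zero => exact ⟨by simp [hc], by simp [hc, h1], by simp [hc, h2]⟩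
            | succ j' =>
              have hb := hbox j' (by omega)
              have harith : i + dx * ((j' : Int) + 1) = i + dx + dx * (j' : Int) := by ring
              simpa [harith, Nat.cast_add] using hb
          · have harith : i + dx * ((k : Int) + 1) = i + dx + dx * (k : Int) := by ring
            simpa [harith, Nat.cast_add] using hwall

lemma scan_reach_false (row : List String) (dx : Int) :
    ∀ (k : Nat) (fuel : Nat) (i : Int), k + 1 ≤ fuel →
      (∀ j < k, isBoxCell (PySem.List.pyGet? row (i + dx * (j : Int)))) →
      PySem.List.pyGet? row (i + dx * (k : Int)) = some "#" →
      l_scan fuel row i dx = some false := by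
  intro k
  induction k with
  | zero =>
    intro fuel i hf _ hwall
    obtain ⟨m, rfl⟩ : ∃ m, fuel = m + 1 := ⟨fuel - 1, by omega⟩
    simp only [l_scan]
    have h00 : i + dx * ((0 : Nat) : Int) = i := by simp
    rw [h00] at hwall
    simp [hwall]
  | succ k' ih =>
    intro fuel i hf hbox hwall
    obtain ⟨m, rfl⟩ : ∃ m, fuel = m + 1 := ⟨fuel - 1, by omega⟩
    simp only [l_scan]
    have hb0 := hbox 0 (by omega)
    have h00 : i + dx * ((0 : Nat) : Int) = i := by simp
    rw [h00] at hb0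
    obtain ⟨hsome, hne1, hne2⟩ := hb0
    cases hc : PySem.List.pyGet? row i with
    | none => rw [hc] at hsome; simp at hsome
    | some c =>
      rw [hc] at hne1 hne2
      have hne1' : ¬ c = "#" := by simpa using hne1
      have hne2' : ¬ c = "." := by simpa using hne2
      simp only [hne1', hne2', if_false]
      refine ih m (i + dx) (by omega) ?_ ?_
      · intro j hj
        have hb := hbox (j + 1) (by omega)
        have harith : i + dx * (((j : Nat) : Int) + 1) = i + dx + dx * (j : Int) := by ring
        simpa [Nat.cast_add, harith] using hb
      · have harith : i + dx * (((k' : Nat) : Int) + 1) = i + dx + dx * (k' : Int) := by ring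
        simpa [Nat.cast_add, harith] using hwall

-- ===== VERDICT (by name: the statement is the Claim_ definition above) =====
theorem l_move_spec : Claim_unchanged_l_move := by
  intro pos dir map _ hpre hnd
  obtain ⟨px, py⟩ := pos
  obtain ⟨dx, dy⟩ := dir
  obtain ⟨hdy, -⟩ := hpre
  simp only at hdy
  subst hdy
  show l_move (px, py) (dx, 0) map = l_move_alt (px, py) (dx, 0) map
  unfold l_move l_move_alt
  simp only [if_neg (by simp : ¬ ((0 : Int) ≠ 0))]
  cases hrow : PySem.List.pyGet? map (px, py).2 with
  | none =>
    have hf : pvFuel (px, py) map = 2 := by simp [pvFuel, pvRow, hrow]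
    rw [hf]
    show l_move_rec 2 (px, py) (dx, 0) map = none
    simp only [l_move_rec]
    have h0 : (px, py).2 + (0 : Int) = py := by simp
    rw [h0]
    simp [pvCell, hrow]
  | some row =>
    have hf : pvFuel (px, py) map = 2 * row.length + 2 := by simp [pvFuel, pvRow, hrow]
    rw [hf, l_move_rec_eq_scan map row py dx hrow]
    cases hs : l_scan (2 * row.length + 2) row (px + dx) dx with
    | none => simp [aFrom, hs]
    | some b =>
      cases b with
      | true => simp [aFrom, hs]
      | false =>
        obtain ⟨k, hk, hbox, hwall⟩ := scan_false_exists row dx _ _ hs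
        cases k with
        | zero =>
          have h00 : px + dx + dx * ((0 : Nat) : Int) = px + dx := by simp
          rw [h00] at hwall
          simp [aFrom, hwall, hs]
        | succ k' =>
          exfalso
          apply hnd
          refine ⟨k', by rw [hf]; omega, ?_, ?_⟩
          · intro j hj
            obtain ⟨-, h1, h2⟩ := hbox j (by omega)
            have harith : px + dx * ((j : Int) + 1) = px + dx + dx * (j : Int) := by ring
            simp [pvCell, hrow, harith, h1, h2]
          · push_cast at hwall
            have harith : px + dx * ((k' : Int) + 2) = px + dx + dx * ((k' : Int) + 1) := by ring
            simp [pvCell, hrow, harith, hwall]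

theorem l_move_changed : Claim_changed_l_move := by unfold Claim_changed_l_move; decide

theorem l_move_tight : Claim_exact_l_move := by
  intro pos dir map _ hpre hd
  obtain ⟨px, py⟩ := pos
  obtain ⟨dx, dy⟩ := dir
  obtain ⟨hdy, hpre2⟩ := hpre
  simp only at hdy
  subst hdy
  obtain ⟨kd, hkd, hdbox, hdwall⟩ := hd
  cases hrow : PySem.List.pyGet? map (px, py).2 with
  | none =>
    exfalso
    have hrow' : PySem.List.pyGet? map py = none := hrow
    have := hdwall
    simp only [pvCell, hrow'] at this
    simp at this
  | some row =>
    -- translate D_'s cells to row lookups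
    have hcell : ∀ x : Int, pvCell map (px, py).2 x = PySem.List.pyGet? row x := by
      intro x; simp [pvCell, hrow]
    rw [hcell] at hdwall
    have hdbox' : ∀ j : Nat, j ≤ kd →
        PySem.List.pyGet? row (px + dx * ((j : Int) + 1)) ∉ [some "#", some "."] := by
      intro j hj; have := hdbox j hj; rwa [hcell] at this
    rw [show pvFuel (px, py) map = 2 * row.length + 2 from by simp [pvFuel, pvRow, hrow]] at hkd
    -- Pre_'s stop must be the wall of D_: k0 = kd + 2
    obtain ⟨k0, hk0lt, hk01, hbox0, hstop0⟩ := hpre2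
    rw [hrow] at hk0lt hbox0 hstop0
    simp only [Option.getD_some] at hk0lt hbox0 hstop0
    have hk0 : k0 = kd + 2 := by
      rcases Nat.lt_trichotomy k0 (kd + 2) with h | h | h
      · exfalso
        have hb := hdbox' (k0 - 1) (by omega)
        have hcast : ((k0 - 1 : Nat) : Int) + 1 = (k0 : Int) := by omega
        rw [hcast] at hb
        rcases hstop0 with hw | ⟨hw, -⟩ <;> simp [hw] at hb
      · exact h
      · exfalso
        obtain ⟨-, h1, -⟩ := hbox0 (kd + 2) (by omega) (by omega)
        have hcast : ((kd + 2 : Nat) : Int) = (kd : Int) + 2 := by omega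
        rw [hcast] at h1
        exact h1 hdwall
    subst hk0
    -- the scan reaches the wall
    have hs : l_scan (2 * row.length + 2) row (px + dx) dx = some false := by
      apply scan_reach_false row dx (kd + 1) _ _ (by omega)
      · intro j hj
        have hb := hbox0 (j + 1) (by omega) (by omega)
        have hcast : ((j + 1 : Nat) : Int) = (j : Int) + 1 := by omega
        rw [hcast] at hb
        have harith : px + dx * ((j : Int) + 1) = px + dx + dx * (j : Int) := by ring
        rwa [harith] at hb
      · have hcast : ((kd + 1 : Nat) : Int) = (kd : Int) + 1 := by omega
        rw [hcast]
        have harith : px + dx + dx * ((kd : Int) + 1) = px + dx * ((kd : Int) + 2) := by ring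
        rw [harith]
        exact hdwall
    -- A's first scanned cell is a box, so A degrades the scan's False to None; B returns False
    have hb1 := hdbox' 0 (by omega)
    have h01 : px + dx * ((0 : Nat) : Int) + dx = px + dx := by simp
    have hb1' : PySem.List.pyGet? row (px + dx) ∉ [some "#", some "."] := by
      have harith : px + dx * (((0 : Nat) : Int) + 1) = px + dx := by simp
      rwa [harith] at hb1
    show l_move (px, py) (dx, 0) map ≠ l_move_alt (px, py) (dx, 0) map
    unfold l_move l_move_alt
    simp only [if_neg (by simp : ¬ ((0 : Int) ≠ 0))]
    rw [show pvFuel (px, py) map = 2 * row.length + 2 from by simp [pvFuel, pvRow, hrow]]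
    rw [l_move_rec_eq_scan map row py dx hrow]
    simp only [hrow]
    rw [hs]
    cases hc : PySem.List.pyGet? row (px + dx) with
    | none => simp [aFrom]
    | some c =>
      rw [hc] at hb1'
      have hcne : c ≠ "#" := by intro h; exact hb1' (by simp [h])
      simp [aFrom, hcne]
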